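-- pv_equiv track=rewrite | github.com/fengbule/IQtest | services/iq/backend/app/scoring.py | ability_from_cpi
-- ===== SOURCE A (Python) =====
-- ABILITY_META = [
--     ("S", "突出水平", "突出表现区", 125),
--     ("A", "优秀水平", "优秀表现区", 110),
--     ("B", "良好水平", "良好表现区", 90),
--     ("C", "中等水平", "中等表现区", 75),
--     ("D", "发展提升", "发展提升区", 60),
--     ("E", "基础观察", "基础观察区", 0),
-- ]
--
-- def ability_from_cpi(cpi: int) -> dict[str, str]:
--     for level, label, zone, threshold in ABILITY_META:
--         if cpi >= threshold:
--             return {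
--                 "level": level,
--                 "label": label,
--                 "zone": zone,
--             }
--     return {
--         "level": "E",
--         "label": "基础观察",
--         "zone": "基础观察区",
--     }
-- ===== SOURCE B (Python) =====
-- _THRESHOLDS = [0, 60, 75, 90, 110, 125]
-- _BANDS = [
--     ("E", "基础观察", "基础观察区"),
--     ("D", "发展提升", "发展提升区"),
--     ("C", "中等水平", "中等表现区"),
--     ("B", "良好水平", "良好表现区"),
--     ("A", "优秀水平", "优秀表现区"),
--     ("S", "突出水平", "突出表现区"),
-- ]
--
-- def ability_from_cpi(cpi: int) -> dict[str, str]: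
--     # hand-written bisect_right over the ascending threshold table
--     lo, hi = 0, len(_THRESHOLDS)
--     while lo < hi:
--         mid = (lo + hi) // 2
--         if cpi < _THRESHOLDS[mid]:
--             hi = mid
--         else:
--             lo = mid + 1
--     i = lo - 1 if lo > 0 else 0
--     level, label, zone = _BANDS[i]
--     return {"level": level, "label": label, "zone": zone}
-- ===== Notes on version B (the rewrite author's own statement) =====
-- stated objective: alternative
-- what changed: Replaced the descending linear first-match scan over ABILITY_META with a binary search (hand-written bisect_right) over an ascending threshold table plus an indexed band lookup.
import Mathlib
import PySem

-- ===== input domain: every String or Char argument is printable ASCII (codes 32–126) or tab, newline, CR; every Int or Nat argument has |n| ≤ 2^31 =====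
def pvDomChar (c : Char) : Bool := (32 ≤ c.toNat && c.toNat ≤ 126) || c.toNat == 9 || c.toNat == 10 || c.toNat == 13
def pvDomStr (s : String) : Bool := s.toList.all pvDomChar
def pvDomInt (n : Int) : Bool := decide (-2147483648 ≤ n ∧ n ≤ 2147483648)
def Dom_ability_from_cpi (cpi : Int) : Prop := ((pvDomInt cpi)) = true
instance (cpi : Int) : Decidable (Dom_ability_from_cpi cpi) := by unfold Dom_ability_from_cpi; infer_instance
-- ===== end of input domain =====

-- B replaces A's descending linear scan with a binary search over an ascending threshold table (alternative, not faster).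

-- ===== PORT A =====
def ABILITY_META : List (String × String × String × Int) :=
  [("S", "突出水平", "突出表现区", 125),
   ("A", "优秀水平", "优秀表现区", 110),
   ("B", "良好水平", "良好表现区", 90),
   ("C", "中等水平", "中等表现区", 75),
   ("D", "发展提升", "发展提升区", 60),
   ("E", "基础观察", "基础观察区", 0)]

-- first-match scan over ABILITY_META, transliterating A's for-loop with fallback
def abilityScan (cpi : Int) : List (String × String × String × Int) → List (String × String)
  | [] => [("level", "E"), ("label", "基础观察"), ("zone", "基础观察区")]
  | (level, label, zone, threshold) :: rest =>
      if cpi ≥ threshold then [("level", level), ("label", label), ("zone", zone)]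
      else abilityScan cpi rest

def ability_from_cpi (cpi : Int) : List (String × String) := abilityScan cpi ABILITY_META

-- ===== PORT B =====
def THRESHOLDS : List Int := [0, 60, 75, 90, 110, 125]
def BANDS : List (String × String × String) :=
  [("E", "基础观察", "基础观察区"),
   ("D", "发展提升", "发展提升区"),
   ("C", "中等水平", "中等表现区"),
   ("B", "良好水平", "良好表现区"),
   ("A", "优秀水平", "优秀表现区"),
   ("S", "突出水平", "突出表现区")]

-- hand-written bisect_right loop from Source B (while lo < hi …), recursion on hi - lo
def bisectRight (cpi : Int) (lo hi : Nat) : Nat :=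
  if lo < hi then
    if cpi < THRESHOLDS.getD ((lo + hi) / 2) 0 then bisectRight cpi lo ((lo + hi) / 2)
    else bisectRight cpi ((lo + hi) / 2 + 1) hi
  else lo
termination_by hi - lo
decreasing_by all_goals omega

def ability_from_cpi_alt (cpi : Int) : List (String × String) :=
  let lo := bisectRight cpi 0 THRESHOLDS.length
  let i := if lo > 0 then lo - 1 else 0
  let t := BANDS.getD i ("", "", "")
  [("level", t.1), ("label", t.2.1), ("zone", t.2.2)]

-- ===== PRECONDITION & SPEC =====
def Spec_ability_from_cpi (cpi : Int) (out : List (String × String)) : Prop := out = ability_from_cpi_alt cpi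
instance (cpi : Int) (out : List (String × String)) : Decidable (Spec_ability_from_cpi cpi out) := by unfold Spec_ability_from_cpi; infer_instance

-- ===== CLAIM (what is proved, stated in full; the proofs are below) =====
def Claim_equal_ability_from_cpi : Prop := ∀ (cpi : Int), Dom_ability_from_cpi cpi → Spec_ability_from_cpi cpi (ability_from_cpi cpi)

-- ===== LEMMAS AND PROOFS =====

theorem bisect_val (cpi : Int) :
    bisectRight cpi 0 6 =
      if cpi < 0 then 0 else if cpi < 60 then 1 else if cpi < 75 then 2
      else if cpi < 90 then 3 else if cpi < 110 then 4 else if cpi < 125 then 5 else 6 := by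
  by_cases h0 : cpi < 0 <;> by_cases h60 : cpi < 60 <;> by_cases h75 : cpi < 75 <;>
    by_cases h90 : cpi < 90 <;> by_cases h110 : cpi < 110 <;> by_cases h125 : cpi < 125 <;>
    first
      | omega
      | (simp [bisectRight, THRESHOLDS, h0, h60, h75, h90, h110, h125])

theorem alt_eval (cpi : Int) :
    ability_from_cpi_alt cpi =
      if cpi ≥ 125 then [("level", "S"), ("label", "突出水平"), ("zone", "突出表现区")]
      else if cpi ≥ 110 then [("level", "A"), ("label", "优秀水平"), ("zone", "优秀表现区")]
      else if cpi ≥ 90 then [("level", "B"), ("label", "良好水平"), ("zone", "良好表现区")]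
      else if cpi ≥ 75 then [("level", "C"), ("label", "中等水平"), ("zone", "中等表现区")]
      else if cpi ≥ 60 then [("level", "D"), ("label", "发展提升"), ("zone", "发展提升区")]
      else [("level", "E"), ("label", "基础观察"), ("zone", "基础观察区")] := by
  unfold ability_from_cpi_alt
  have hlen : THRESHOLDS.length = 6 := by rfl
  rw [hlen, bisect_val]
  split_ifs <;> first | omega | simp_all [BANDS]

theorem ability_from_cpi_spec : Claim_equal_ability_from_cpi := by
  intro cpi _
  unfold Spec_ability_from_cpi
  rw [alt_eval]
  unfold ability_from_cpi ABILITY_META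
  simp only [abilityScan]
  split_ifs <;> first | rfl | omega
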